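-- pv_equiv track=rewrite | github.com/bica-tools/reticulate | reticulate/ect_fingerprint.py | _chains_in_subset
-- ===== SOURCE A (Python) =====
-- def _chains_in_subset(
--     subset: list[int],
--     reach: dict[int, set[int]],
--     scc_map: dict[int, int],
-- ) -> list[list[int]]:
--     """Enumerate all non-empty chains (totally ordered subsets) in subset.
--
--     A chain is a list [x_0, x_1, ..., x_k] with x_0 > x_1 > ... > x_k in
--     the partial order (strict, SCC-quotient).
--     """
--     sub = set(subset)
--
--     def strictly_above(a: int, b: int) -> bool:
--         # a > b iff b reachable from a and they are in different SCCs
--         return a != b and b in reach[a] and scc_map[a] != scc_map[b]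
--
--     chains: list[list[int]] = []
--
--     def extend(prefix: list[int]) -> None:
--         chains.append(list(prefix))
--         last = prefix[-1]
--         for y in subset:
--             if y in sub and strictly_above(last, y):
--                 prefix.append(y)
--                 extend(prefix)
--                 prefix.pop()
--
--     for x in subset:
--         extend([x])
--     return chains
-- ===== SOURCE B (Python) =====
-- def _chains_in_subset(
--     subset: list[int],
--     reach: dict[int, set[int]],
--     scc_map: dict[int, int],
-- ) -> list[list[int]]:
--     """Enumerate all non-empty chains by bottom-up dynamic programming.
--
--     Instead of a depth-first search, build for every distinct value x a table
--     entry table[x] = all chains starting at x, by iterating the one-step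
--     recurrence table[x] = [[x]] + [[x]+c for each successor y, c in table[y]]
--     len(subset)-1 times (chains are at most len(subset) long, so the table is
--     a fixpoint by then); the answer is the concatenation of table[x] over subset.
--     """
--     nodes = list(dict.fromkeys(subset))  # distinct values, first-occurrence order
--     succ = {x: [y for y in subset
--                 if y != x and y in reach[x] and scc_map[x] != scc_map[y]]
--             for x in nodes}
--     table = {x: [[x]] for x in nodes}
--     for _ in range(max(len(subset) - 1, 0)):
--         table = {x: [[x]] + [[x] + c for y in succ[x] for c in table[y]]
--                  for x in nodes}
--     return [c for x in subset for c in table[x]]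
-- ===== Notes on version B (the rewrite author's own statement) =====
-- stated objective: faster
-- what changed: B replaces A's depth-first search with a shared mutable prefix by bottom-up dynamic programming: it builds a table mapping each distinct value to the full list of chains starting there via len(subset)-1 rounds of the recurrence table[x] = [[x]] + [x]+c for successors y and c in table[y], then concatenates table[x] over subset; chain lists are computed once per distinct start and shared, instead of A re-walking every chain element by element with a full subset rescan and guard evaluation at each recursion step.
import Mathlib
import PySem

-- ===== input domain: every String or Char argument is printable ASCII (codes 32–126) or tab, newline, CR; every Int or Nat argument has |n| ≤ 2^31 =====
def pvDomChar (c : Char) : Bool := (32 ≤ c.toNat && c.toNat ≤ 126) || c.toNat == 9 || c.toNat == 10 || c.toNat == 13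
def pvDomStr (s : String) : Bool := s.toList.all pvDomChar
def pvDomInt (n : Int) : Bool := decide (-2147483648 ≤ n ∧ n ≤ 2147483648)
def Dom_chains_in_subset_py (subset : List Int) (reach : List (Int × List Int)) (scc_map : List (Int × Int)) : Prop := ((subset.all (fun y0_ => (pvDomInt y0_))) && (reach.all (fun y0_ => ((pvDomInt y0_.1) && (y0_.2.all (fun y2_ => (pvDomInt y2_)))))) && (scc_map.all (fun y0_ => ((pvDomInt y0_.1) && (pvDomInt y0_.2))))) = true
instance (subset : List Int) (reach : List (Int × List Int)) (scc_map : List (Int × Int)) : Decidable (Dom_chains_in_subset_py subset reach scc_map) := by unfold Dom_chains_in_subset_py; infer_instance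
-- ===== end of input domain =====

-- B replaces A's depth-first search (shared mutable prefix, global append) by bottom-up dynamic
-- programming: a table of all chains starting at each distinct value, built by iterating the
-- one-step recurrence, then concatenated over subset.

-- ===== PORT A =====
-- strictly_above(a, b); reach[a]/scc_map[·] would raise KeyError on a missing key —
-- Pre_ guarantees the keys are present, so the total getD form is exact there.
def saA (reach : List (Int × List Int)) (scc_map : List (Int × Int)) (a b : Int) : Bool :=
  a != b && ((PySem.Dict.mk reach).getD a []).contains b
    && ((PySem.Dict.mk scc_map).getD a 0 != (PySem.Dict.mk scc_map).getD b 0)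

-- extend(prefix): the Nat argument is a fuel guard for totality only; under Pre_ (acyclicity)
-- chains never exceed subset.length elements, so the 0-branch cut of the loop is never reached.
def extendA (subset : List Int) (sub : PySem.Set Int) (reach : List (Int × List Int))
    (scc_map : List (Int × Int)) : Nat → List Int → List (List Int) → List (List Int)
  | 0, pre, chains => chains ++ [pre]
  | Nat.succ f, pre, chains =>
      let chains' := chains ++ [pre]
      let last := pre.getLast?.getD 0   -- pre[-1]; pre is nonempty at every call
      subset.foldl (fun ch y =>
        if PySem.Set.contains sub y && saA reach scc_map last y then
          extendA subset sub reach scc_map f (pre ++ [y]) ch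
        else ch) chains'

def chains_in_subset_py (subset : List Int) (reach : List (Int × List Int)) (scc_map : List (Int × Int)) : List (List Int) :=
  let sub := PySem.Set.ofList subset
  subset.foldl (fun ch x => extendA subset sub reach scc_map (subset.length - 1) [x] ch) []

-- ===== PORT B =====
-- the comprehension guard of Source B: y != x and y in reach[x] and scc_map[x] != scc_map[y]
def sbB (reach : List (Int × List Int)) (scc_map : List (Int × Int)) (x y : Int) : Bool :=
  y != x && ((PySem.Dict.mk reach).getD x []).contains y
    && ((PySem.Dict.mk scc_map).getD x 0 != (PySem.Dict.mk scc_map).getD y 0)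

-- succ = {x: [y for y in subset if …] for x in nodes}
def buildSuccB (nodes subset : List Int) (reach : List (Int × List Int)) (scc_map : List (Int × Int)) : PySem.Dict Int (List Int) :=
  nodes.foldl (fun d x => d.insert x (subset.filter (sbB reach scc_map x))) PySem.Dict.empty

-- table = {x: [[x]] for x in nodes}
def tableInitB (nodes : List Int) : PySem.Dict Int (List (List Int)) :=
  nodes.foldl (fun d x => d.insert x [[x]]) PySem.Dict.empty

-- one round: table = {x: [[x]] + [[x] + c for y in succ[x] for c in table[y]] for x in nodes}
-- (table[y]/succ[x] are present for every key used, so the getD default is never taken)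
def stepB (nodes : List Int) (succ : PySem.Dict Int (List Int))
    (t : PySem.Dict Int (List (List Int))) : PySem.Dict Int (List (List Int)) :=
  nodes.foldl (fun d x =>
    d.insert x ([[x]] ++ (succ.getD x []).flatMap (fun y => (t.getD y []).map (fun c => x :: c))))
    PySem.Dict.empty

-- for _ in range(k): table = {…}
def loopB (nodes : List Int) (succ : PySem.Dict Int (List Int)) :
    Nat → PySem.Dict Int (List (List Int)) → PySem.Dict Int (List (List Int))
  | 0, t => t
  | Nat.succ k, t => loopB nodes succ k (stepB nodes succ t)

def chains_in_subset_py_alt (subset : List Int) (reach : List (Int × List Int)) (scc_map : List (Int × Int)) : List (List Int) :=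
  let nodes := PySem.List.dedup subset          -- list(dict.fromkeys(subset))
  let succ := buildSuccB nodes subset reach scc_map
  let table := loopB nodes succ (subset.length - 1) (tableInitB nodes)   -- max(len(subset)-1, 0)
  subset.flatMap (fun x => table.getD x [])     -- [c for x in subset for c in table[x]]

-- ===== PRECONDITION & SPEC =====
-- helper copies of the guard for Pre_ only (Pre_ may not reach the ports)
def pvAbove (reach : List (Int × List Int)) (scc_map : List (Int × Int)) (a b : Int) : Bool :=
  a != b && ((PySem.Dict.mk reach).getD a []).contains b
    && ((PySem.Dict.mk scc_map).getD a 0 != (PySem.Dict.mk scc_map).getD b 0)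

def pvStep (subset : List Int) (reach : List (Int × List Int)) (scc_map : List (Int × Int)) (S : List Int) : List Int :=
  S ++ subset.filter (fun b => !S.contains b && S.any (fun a => pvAbove reach scc_map a b))

def pvReachFrom (subset : List Int) (reach : List (Int × List Int)) (scc_map : List (Int × Int)) (x : Int) : List Int :=
  (pvStep subset reach scc_map)^[subset.length] (subset.filter (pvAbove reach scc_map x))

-- Pre_ excludes exactly the inputs where the Python A raises: a KeyError (some pair of distinct
-- subset elements needs a reach/scc_map key that is absent) or a RecursionError (the strict-order
-- relation has a cycle inside subset, so the chain enumeration never terminates).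
def Pre_chains_in_subset_py (subset : List Int) (reach : List (Int × List Int)) (scc_map : List (Int × Int)) : Prop :=
  (∀ a ∈ subset, ∀ b ∈ subset, a ≠ b →
      ((PySem.Dict.mk reach).get? a).isSome = true ∧
      (((PySem.Dict.mk reach).getD a []).contains b = true →
        ((PySem.Dict.mk scc_map).get? a).isSome = true ∧ ((PySem.Dict.mk scc_map).get? b).isSome = true)) ∧
  (∀ x ∈ subset, x ∉ pvReachFrom subset reach scc_map x)

instance (subset : List Int) (reach : List (Int × List Int)) (scc_map : List (Int × Int)) : Decidable (Pre_chains_in_subset_py subset reach scc_map) := by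
  unfold Pre_chains_in_subset_py; infer_instance

def pvWitness_chains_in_subset_py : List Int × (List (Int × List Int)) × (List (Int × Int)) :=
  ([3, 2], [(3, [2]), (2, [])], [(3, 0), (2, 1)])

def Spec_chains_in_subset_py (subset : List Int) (reach : List (Int × List Int)) (scc_map : List (Int × Int)) (out : List (List Int)) : Prop := out = chains_in_subset_py_alt subset reach scc_map
instance (subset : List Int) (reach : List (Int × List Int)) (scc_map : List (Int × Int)) (out : List (List Int)) : Decidable (Spec_chains_in_subset_py subset reach scc_map out) := by unfold Spec_chains_in_subset_py; infer_instance

-- ===== CLAIM (what is proved, stated in full; the proofs are below) =====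
def Claim_equal_chains_in_subset_py : Prop := ∀ (subset : List Int) (reach : List (Int × List Int)) (scc_map : List (Int × Int)), Dom_chains_in_subset_py subset reach scc_map → Pre_chains_in_subset_py subset reach scc_map → Spec_chains_in_subset_py subset reach scc_map (chains_in_subset_py subset reach scc_map)

-- ===== LEMMAS AND PROOFS =====

-- common reference function: all chains starting at x whose length is at most k+1
def pc (subset : List Int) (reach : List (Int × List Int)) (scc_map : List (Int × Int)) : Nat → Int → List (List Int)
  | 0, x => [[x]]
  | Nat.succ k, x =>
      [[x]] ++ (subset.filter (sbB reach scc_map x)).flatMap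
        (fun y => (pc subset reach scc_map k y).map (fun c => x :: c))

theorem guard_eq (reach : List (Int × List Int)) (scc_map : List (Int × Int)) (a b : Int) :
    saA reach scc_map a b = sbB reach scc_map a b := by
  have h : (a != b) = (b != a) := by
    simp only [bne]
    by_cases h : a = b
    · simp [h]
    · simp [h, Ne.symm h]
  simp [saA, sbB, h]

theorem extendA_eq_pc (subset : List Int) (reach : List (Int × List Int)) (scc_map : List (Int × Int)) :
    ∀ (fuel : Nat) (q : List Int) (l : Int) (acc : List (List Int)),
      extendA subset (PySem.Set.ofList subset) reach scc_map fuel (q ++ [l]) acc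
        = acc ++ (pc subset reach scc_map fuel l).map (fun c => q ++ c) := by
  intro fuel
  induction fuel with
  | zero => intro q l acc; simp [extendA, pc]
  | succ f ih =>
      intro q l acc
      show (subset.foldl (fun ch y =>
              if PySem.Set.contains (PySem.Set.ofList subset) y
                  && saA reach scc_map ((q ++ [l]).getLast?.getD 0) y then
                extendA subset (PySem.Set.ofList subset) reach scc_map f (q ++ [l] ++ [y]) ch
              else ch) (acc ++ [q ++ [l]])) = _
      have hlast : (q ++ [l]).getLast?.getD 0 = l := by simp
      rw [hlast]
      have h1 : (subset.foldl (fun ch y =>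
              if PySem.Set.contains (PySem.Set.ofList subset) y && saA reach scc_map l y then
                extendA subset (PySem.Set.ofList subset) reach scc_map f (q ++ [l] ++ [y]) ch
              else ch) (acc ++ [q ++ [l]]))
          = (subset.foldl (fun ch y =>
              if sbB reach scc_map l y then
                ch ++ (pc subset reach scc_map f y).map (fun c => (q ++ [l]) ++ c)
              else ch) (acc ++ [q ++ [l]])) := by
        apply PySem.List.foldl_congr_mem
        intro acc' y hy
        have hc : PySem.Set.contains (PySem.Set.ofList subset) y = true := by
          rw [PySem.Set.contains_iff, PySem.Set.mem_ofList]; exact hy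
        rw [hc, guard_eq]
        by_cases hg : sbB reach scc_map l y
        · simp only [hg, if_true]
          exact ih (q ++ [l]) y acc'
        · simp [hg]
      rw [h1, PySem.List.foldl_if_eq_foldl_filter, PySem.List.foldl_append_eq_flatMap]
      simp [pc, List.map_flatMap, List.map_map, Function.comp_def]
theorem chainsA_eq (subset : List Int) (reach : List (Int × List Int)) (scc_map : List (Int × Int)) :
    chains_in_subset_py subset reach scc_map
      = subset.flatMap (fun x => pc subset reach scc_map (subset.length - 1) x) := by
  unfold chains_in_subset_py
  have h : (subset.foldl (fun ch x =>
        extendA subset (PySem.Set.ofList subset) reach scc_map (subset.length - 1) [x] ch) [])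
      = subset.foldl (fun ch x => ch ++ pc subset reach scc_map (subset.length - 1) x) [] := by
    apply PySem.List.foldl_congr_mem
    intro acc x _
    have := extendA_eq_pc subset reach scc_map (subset.length - 1) [] x acc
    simpa using this
  rw [h, PySem.List.foldl_append_eq_flatMap]
  simp

-- getD after a fold of inserts keyed by the fold's own element
theorem foldl_insert_get? {β : Type} (F : Int → β) :
    ∀ (l : List Int) (d : PySem.Dict Int β) (k : Int),
      (l.foldl (fun d x => d.insert x (F x)) d).get? k
        = if k ∈ l then some (F k) else d.get? k := by
  intro l
  induction l with
  | nil => intro d k; simp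
  | cons a t ih =>
      intro d k
      simp only [List.foldl_cons, ih, PySem.Dict.get?_insert, List.mem_cons]
      by_cases hk : k ∈ t
      · simp [hk]
      · by_cases hka : k = a <;> simp [hk, hka]

theorem succ_getD (subset : List Int) (reach : List (Int × List Int)) (scc_map : List (Int × Int))
    (k : Int) (hk : k ∈ subset) :
    (buildSuccB (PySem.List.dedup subset) subset reach scc_map).getD k []
      = subset.filter (sbB reach scc_map k) := by
  unfold buildSuccB
  rw [PySem.Dict.getD_eq_get?_getD, foldl_insert_get?]
  simp [hk]

theorem step_getD (subset : List Int) (reach : List (Int × List Int)) (scc_map : List (Int × Int))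
    (m : Nat) (t : PySem.Dict Int (List (List Int)))
    (ht : ∀ y ∈ subset, t.getD y [] = pc subset reach scc_map m y) :
    ∀ x ∈ subset,
      (stepB (PySem.List.dedup subset) (buildSuccB (PySem.List.dedup subset) subset reach scc_map) t).getD x []
        = pc subset reach scc_map (m + 1) x := by
  intro x hx
  unfold stepB
  rw [PySem.Dict.getD_eq_get?_getD,
      foldl_insert_get? (fun x => [[x]] ++ ((buildSuccB (PySem.List.dedup subset) subset reach scc_map).getD x []).flatMap (fun y => (t.getD y []).map (fun c => x :: c)))]
  simp only [PySem.List.mem_dedup, hx, if_true, Option.getD_some]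
  rw [succ_getD subset reach scc_map x hx]
  show [[x]] ++ (subset.filter (sbB reach scc_map x)).flatMap (fun y => (t.getD y []).map (fun c => x :: c)) = _
  have : (subset.filter (sbB reach scc_map x)).flatMap (fun y => (t.getD y []).map (fun c => x :: c))
      = (subset.filter (sbB reach scc_map x)).flatMap (fun y => (pc subset reach scc_map m y).map (fun c => x :: c)) := by
    apply List.flatMap_congr
    intro y hy
    rw [ht y (List.mem_of_mem_filter hy)]
  rw [this]
  rfl

theorem loop_getD (subset : List Int) (reach : List (Int × List Int)) (scc_map : List (Int × Int)) :
    ∀ (k m : Nat) (t : PySem.Dict Int (List (List Int))),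
      (∀ y ∈ subset, t.getD y [] = pc subset reach scc_map m y) →
      ∀ x ∈ subset,
        (loopB (PySem.List.dedup subset) (buildSuccB (PySem.List.dedup subset) subset reach scc_map) k t).getD x []
          = pc subset reach scc_map (m + k) x := by
  intro k
  induction k with
  | zero => intro m t ht x hx; simpa using ht x hx
  | succ k ih =>
      intro m t ht x hx
      show (loopB _ _ k (stepB _ _ t)).getD x [] = _
      have := ih (m + 1) (stepB (PySem.List.dedup subset) (buildSuccB (PySem.List.dedup subset) subset reach scc_map) t)
        (step_getD subset reach scc_map m t ht) x hx
      rw [this]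
      congr 1
      omega

theorem init_getD (subset : List Int) :
    ∀ y ∈ subset, (tableInitB (PySem.List.dedup subset)).getD y [] = [[y]] := by
  intro y hy
  unfold tableInitB
  rw [PySem.Dict.getD_eq_get?_getD, foldl_insert_get? (fun x => [[x]])]
  simp [hy]

theorem chainsB_eq (subset : List Int) (reach : List (Int × List Int)) (scc_map : List (Int × Int)) :
    chains_in_subset_py_alt subset reach scc_map
      = subset.flatMap (fun x => pc subset reach scc_map (subset.length - 1) x) := by
  unfold chains_in_subset_py_alt
  apply List.flatMap_congr
  intro x hx
  have h0 : ∀ y ∈ subset, (tableInitB (PySem.List.dedup subset)).getD y [] = pc subset reach scc_map 0 y := by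
    intro y hy; rw [init_getD subset y hy]; rfl
  have := loop_getD subset reach scc_map (subset.length - 1) 0 (tableInitB (PySem.List.dedup subset)) h0 x hx
  simpa using this

-- ===== VERDICT (by name: the statement is the Claim_ definition above) =====
theorem chains_in_subset_py_spec : Claim_equal_chains_in_subset_py := by
  intro subset reach scc_map _ _
  show chains_in_subset_py subset reach scc_map = chains_in_subset_py_alt subset reach scc_map
  rw [chainsA_eq, chainsB_eq]
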